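-- pv_equiv track=rewrite | github.com/hi-hj/algorithm-study | 프로그래머스/l1_폰켓몬.py | solution
-- ===== SOURCE A (Python) =====
-- from collections import Counter
--
-- def solution(nums):
--     count = Counter(nums)
--     max_num = len(nums)//2
--     answer = 0
--     for num in count:
--         if answer >= max_num:
--             break
--         answer +=1
--     return answer
-- ===== SOURCE B (Python) =====
-- def solution(nums):
--     return min(len(set(nums)), len(nums) // 2)
-- ===== Notes on version B (the rewrite author's own statement) =====
-- stated objective: simpler
-- what changed: Replaces the Counter build plus the capped counting loop over its keys with a single closed-form min(len(set(nums)), len(nums)//2).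
import Mathlib
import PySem

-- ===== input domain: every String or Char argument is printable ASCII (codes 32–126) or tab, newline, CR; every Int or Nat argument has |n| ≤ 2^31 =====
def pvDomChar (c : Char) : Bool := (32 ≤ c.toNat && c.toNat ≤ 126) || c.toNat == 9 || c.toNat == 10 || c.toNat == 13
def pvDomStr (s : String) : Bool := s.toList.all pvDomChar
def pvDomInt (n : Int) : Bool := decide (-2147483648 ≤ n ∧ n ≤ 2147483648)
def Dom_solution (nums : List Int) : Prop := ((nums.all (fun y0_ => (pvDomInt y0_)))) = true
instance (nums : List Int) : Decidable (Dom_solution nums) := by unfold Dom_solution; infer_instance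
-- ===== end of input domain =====

-- B replaces A's Counter build and capped counting loop by the closed form min(len(set(nums)), len(nums)//2); objective: simpler.


-- ===== PORT A =====
-- the 'for num in count: if answer >= max_num: break; answer += 1' loop
def solutionLoop : List Int → Int → Int → Int
  | [], _, answer => answer
  | _ :: t, max_num, answer =>
      if answer ≥ max_num then answer else solutionLoop t max_num (answer + 1)

def solution (nums : List Int) : Int :=
  let count := PySem.Dict.counter nums
  let max_num := PySem.Int.floordiv (nums.length : Int) 2
  solutionLoop count.keys max_num 0

-- ===== PORT B =====
def solution_alt (nums : List Int) : Int :=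
  min ((PySem.Set.ofList nums).length : Int) (PySem.Int.floordiv (nums.length : Int) 2)

-- ===== PRECONDITION & SPEC =====
def Spec_solution (nums : List Int) (out : Int) : Prop := out = solution_alt nums
instance (nums : List Int) (out : Int) : Decidable (Spec_solution nums out) := by unfold Spec_solution; infer_instance

-- ===== CLAIM (what is proved, stated in full; the proofs are below) =====
def Claim_equal_solution : Prop := ∀ (nums : List Int), Dom_solution nums → Spec_solution nums (solution nums)

-- ===== LEMMAS AND PROOFS =====
lemma solutionLoop_eq (l : List Int) (m a : Int) :
    solutionLoop l m a = if a ≥ m then a else min (a + l.length) m := by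
  induction l generalizing a with
  | nil => simp [solutionLoop]; omega
  | cons h t ih =>
      simp only [solutionLoop, ih, List.length_cons]
      split_ifs <;> push_cast <;> omega

lemma foldl_add_length (xs : List Int) (s : PySem.Set Int) :
    (xs.foldl PySem.Set.add s).length ≤ s.length + xs.length := by
  induction xs generalizing s with
  | nil => simp
  | cons h t ih =>
      simp only [List.foldl_cons, List.length_cons]
      calc (t.foldl PySem.Set.add (s.add h)).length ≤ (s.add h).length + t.length := ih _
        _ ≤ s.length + (t.length + 1) := by
            simp [PySem.Set.add]; split_ifs <;> simp; omega

-- ===== VERDICT (by name: the statement is the Claim_ definition above) =====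
theorem solution_spec : Claim_equal_solution := by
  intro nums _
  show solution nums = solution_alt nums
  simp only [solution, solution_alt]
  rw [PySem.Dict.keys_counter, solutionLoop_eq]
  rw [show PySem.Int.floordiv (nums.length : Int) 2 = ((nums.length / 2 : Nat) : Int) from
    PySem.Int.floordiv_natCast nums.length 2]
  have hk : (PySem.Set.ofList nums).length ≤ nums.length := by
    rw [PySem.Set.ofList_eq_foldl]
    simpa using foldl_add_length nums PySem.Set.empty
  split_ifs <;> push_cast <;> omega
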